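-- pv_equiv track=rewrite | github.com/willingtonortiz/complejidad-algoritmica | semana_02/ejercicios/ejercicio_03.py | is_valid_operation
-- ===== SOURCE A (Python) =====
-- def replace_letters(letters_map, word):
-- 	num = 0
-- 	for letter in word:
-- 		num *= 10
-- 		num += letters_map[letter]
-- 	return num
--
-- def is_valid_operation(letters_map, words):
--
-- 	words_sum = 0
-- 	total = replace_letters(letters_map, words[-1])
--
-- 	for word in words[:-1]:
-- 		words_sum += replace_letters(letters_map, word)
--
-- 	if words_sum == total:
-- 		return True
-- 	return False
-- ===== SOURCE B (Python) =====
-- def is_valid_operation(letters_map, words):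
--     last = words[-1]
--     coeffs = {}
--     for word in words[:-1]:
--         p = 1
--         for ch in reversed(word):
--             coeffs[ch] = coeffs.get(ch, 0) + p
--             p *= 10
--     p = 1
--     for ch in reversed(last):
--         coeffs[ch] = coeffs.get(ch, 0) - p
--         p *= 10
--     total = 0
--     for ch, c in coeffs.items():
--         total += c * letters_map[ch]
--     return total == 0
-- ===== Notes on version B (the rewrite author's own statement) =====
-- stated objective: alternative
-- what changed: B never computes any word's numeric value: it builds a symbolic coefficient dictionary mapping each character to its net place-value weight (+10^i over the prefix words, -10^i over the last word) and returns whether the single dot product of these coefficients with letters_map is zero, exploiting linearity of the word value in the letter digits.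
import Mathlib
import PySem

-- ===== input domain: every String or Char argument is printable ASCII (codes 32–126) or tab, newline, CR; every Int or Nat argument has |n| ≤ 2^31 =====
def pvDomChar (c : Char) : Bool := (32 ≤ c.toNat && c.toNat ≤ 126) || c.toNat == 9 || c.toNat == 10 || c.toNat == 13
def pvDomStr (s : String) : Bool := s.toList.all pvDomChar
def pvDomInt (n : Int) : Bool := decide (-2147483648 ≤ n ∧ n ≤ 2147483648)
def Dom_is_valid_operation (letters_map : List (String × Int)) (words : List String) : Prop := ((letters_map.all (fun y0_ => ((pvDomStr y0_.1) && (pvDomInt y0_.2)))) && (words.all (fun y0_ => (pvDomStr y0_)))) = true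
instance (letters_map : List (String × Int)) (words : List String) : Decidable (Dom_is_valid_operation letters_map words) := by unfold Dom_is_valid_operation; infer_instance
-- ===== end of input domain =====

-- B builds a symbolic coefficient dictionary (char ↦ net place weight: + over the prefix words, − over
-- the last word) and tests one dot product with letters_map against 0, instead of evaluating word
-- values and summing them; same cost (objective: alternative).

-- shared helper: Python's `letters_map[key]` on the assoc-list dict (first match; none = KeyError)
def pvLookup (m : List (String × Int)) (k : String) : Option Int :=
  (m.find? (fun p => p.1 == k)).map (·.2)

-- ===== PORT A =====
def replace_letters (m : List (String × Int)) (word : String) : Option Int :=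
  word.toList.foldl
    (fun acc c => acc.bind (fun num => (pvLookup m (String.singleton c)).map (fun v => num * 10 + v)))
    (some 0)

def is_valid_operation (letters_map : List (String × Int)) (words : List String) : Bool :=
  match PySem.List.pyGet? words (-1) with
  | none => false  -- IndexError on empty words (outside Pre_)
  | some lastw =>
    match replace_letters letters_map lastw with
    | none => false  -- KeyError (outside Pre_)
    | some total =>
      match (PySem.List.slice words none (some (-1))).foldl
          (fun acc w => acc.bind (fun s => (replace_letters letters_map w).map (fun v => s + v)))
          (some 0) with
      | none => false  -- KeyError (outside Pre_)
      | some words_sum => if words_sum = total then true else false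

-- ===== PORT B =====
-- inner loop `for ch in reversed(word): coeffs[ch] = coeffs.get(ch, 0) + sgn*p; p *= 10`
def coeff_word (sgn : Int) (word : String) (dp : PySem.Dict String Int × Int) :
    PySem.Dict String Int × Int :=
  word.toList.reverse.foldl
    (fun dp c =>
      (dp.1.insert (String.singleton c) (dp.1.getD (String.singleton c) 0 + sgn * dp.2),
       dp.2 * 10))
    dp

def is_valid_operation_alt (letters_map : List (String × Int)) (words : List String) : Bool :=
  match PySem.List.pyGet? words (-1) with
  | none => false  -- IndexError on empty words (outside Pre_)
  | some lastw =>
    let coeffs1 := (PySem.List.slice words none (some (-1))).foldl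
      (fun d w => (coeff_word 1 w (d, 1)).1) PySem.Dict.empty
    let coeffs := (coeff_word (-1) lastw (coeffs1, 1)).1
    match coeffs.items.foldl
        (fun acc q => acc.bind (fun t => (pvLookup letters_map q.1).map (fun v => t + q.2 * v)))
        (some 0) with
    | none => false  -- KeyError (outside Pre_)
    | some total => total = 0

-- ===== PRECONDITION & SPEC =====
-- Pre_ excludes exactly the inputs where Python A raises: IndexError on words = [] and
-- KeyError when some character of some word is not a key of letters_map.
def Pre_is_valid_operation (letters_map : List (String × Int)) (words : List String) : Prop :=
  words ≠ [] ∧ (words.all (fun w => w.toList.all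
    (fun c => (letters_map.map Prod.fst).contains (String.singleton c)))) = true
instance (letters_map : List (String × Int)) (words : List String) : Decidable (Pre_is_valid_operation letters_map words) := by unfold Pre_is_valid_operation; infer_instance

def pvWitness_is_valid_operation : (List (String × Int)) × List String :=
  ([("a", 1), ("b", 2)], ["ab", "b", "ba"])

def Spec_is_valid_operation (letters_map : List (String × Int)) (words : List String) (out : Bool) : Prop := out = is_valid_operation_alt letters_map words
instance (letters_map : List (String × Int)) (words : List String) (out : Bool) : Decidable (Spec_is_valid_operation letters_map words out) := by unfold Spec_is_valid_operation; infer_instance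

-- ===== CLAIM =====
def Claim_equal_is_valid_operation : Prop := ∀ (letters_map : List (String × Int)) (words : List String), Dom_is_valid_operation letters_map words → Pre_is_valid_operation letters_map words → Spec_is_valid_operation letters_map words (is_valid_operation letters_map words)

-- ===== LEMMAS AND PROOFS =====

-- value of a present key, with default 0 (only used under Pre_)
def pvValS (m : List (String × Int)) (k : String) : Int := (pvLookup m k).getD 0
def pvValD (m : List (String × Int)) (c : Char) : Int := pvValS m (String.singleton c)

lemma pvLookup_of_mem {m : List (String × Int)} {k : String}
    (h : k ∈ m.map Prod.fst) : pvLookup m k = some (pvValS m k) := by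
  have : (m.find? (fun p => p.1 == k)).isSome := by
    rw [List.find?_isSome]
    rcases List.mem_map.mp h with ⟨p, hp, he⟩
    exact ⟨p, hp, by simp [he]⟩
  rcases Option.isSome_iff_exists.mp this with ⟨p, hp⟩
  simp [pvValS, pvLookup, hp]

-- an Option-threaded foldl whose step always succeeds equals the pure foldl
lemma opt_foldl {α : Type} (f : Int → α → Option Int) (g : Int → α → Int) :
    ∀ (l : List α) (acc : Int), (∀ a x, x ∈ l → f a x = some (g a x)) →
      l.foldl (fun o x => o.bind (fun a => f a x)) (some acc) = some (l.foldl g acc) := by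
  intro l
  induction l with
  | nil => intro acc _; simp
  | cons x xs ih =>
    intro acc h
    simp only [List.foldl_cons, Option.bind_some]
    rw [h acc x (List.mem_cons_self ..)]
    exact ih (g acc x) (fun a y hy => h a y (List.mem_cons_of_mem _ hy))

lemma foldl_add_sum {α : Type} (f : α → Int) :
    ∀ (l : List α) (a : Int), l.foldl (fun t q => t + f q) a = a + (l.map f).sum := by
  intro l
  induction l with
  | nil => intro a; simp
  | cons x xs ih => intro a; simp [List.foldl_cons, ih]; ring

-- Horner value of a word (A's replace_letters, pure)
def pvHval (m : List (String × Int)) (w : String) : Int :=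
  w.toList.foldl (fun s c => s * 10 + pvValD m c) 0

lemma replace_letters_eq (m : List (String × Int)) (w : String)
    (h : ∀ c ∈ w.toList, String.singleton c ∈ m.map Prod.fst) :
    replace_letters m w = some (pvHval m w) := by
  unfold replace_letters pvHval
  exact opt_foldl (fun num c => (pvLookup m (String.singleton c)).map (fun v => num * 10 + v))
    (fun s c => s * 10 + pvValD m c) w.toList 0
    (fun a c hc => by simp [pvLookup_of_mem (h c hc), pvValD])

-- low-to-high reading of a char list (B's reversed iteration, pure)
def pvRval (m : List (String × Int)) : List Char → Int
  | [] => 0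
  | c :: cs => pvValD m c + 10 * pvRval m cs

lemma rval_reverse (m : List (String × Int)) (l : List Char) :
    pvRval m l.reverse = l.foldl (fun s c => s * 10 + pvValD m c) 0 := by
  suffices h : ∀ a : Int,
      pvRval m l.reverse = l.foldl (fun s c => s * 10 + pvValD m c) a - a * 10 ^ l.length by
    simpa using h 0
  induction l using List.reverseRecOn with
  | nil => intro a; simp [pvRval]
  | append_singleton xs c ih =>
    intro a
    rw [List.reverse_append]
    simp only [List.reverse_cons, List.reverse_nil, List.nil_append, List.cons_append,
      List.foldl_append, List.foldl_cons, List.foldl_nil, pvRval, List.length_append,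
      List.length_cons, List.length_nil]
    rw [ih a]
    ring

-- dot product of an items list with letters_map
def pvDot (m : List (String × Int)) (l : List (String × Int)) : Int :=
  (l.map (fun q => q.2 * pvValS m q.1)).sum

-- replacing the (unique) entry at key k changes the dot product by the value difference
lemma dot_map_replace (m : List (String × Int)) (k : String) (w : Int) :
    ∀ (l : List (String × Int)), (l.map Prod.fst).Nodup → ∀ v0, (k, v0) ∈ l →
      pvDot m (l.map (fun q => if q.1 == k then (k, w) else q))
        = pvDot m l + (w - v0) * pvValS m k := by
  intro l
  induction l with
  | nil => intro _ v0 h; simp at h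
  | cons q qs ih =>
    intro hnd v0 hmem
    rw [List.map_cons] at hnd
    have hnd2 := List.nodup_cons.mp hnd
    rcases List.mem_cons.mp hmem with h | h
    · have hq1 : q.1 = k := by rw [← h]
      have hq2 : q.2 = v0 := by rw [← h]
      have htail : qs.map (fun q => if q.1 == k then (k, w) else q) = qs := by
        rw [List.map_congr_left (g := id), List.map_id]
        intro r hr
        have hne : r.1 ≠ k := by
          intro he
          apply hnd2.1
          rw [hq1, ← he]
          exact List.mem_map.mpr ⟨r, hr, rfl⟩
        simp [hne]
      simp only [pvDot, List.map_cons, hq1, beq_self_eq_true, if_true, htail, List.sum_cons]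
      rw [hq2]
      ring
    · have hne : (q.1 == k) = false := by
        apply beq_eq_false_iff_ne.mpr
        intro he
        apply hnd2.1
        rw [he]
        exact List.mem_map.mpr ⟨(k, v0), h, rfl⟩
      simp only [pvDot, List.map_cons, hne, Bool.false_eq_true, if_false, List.sum_cons]
      have hih := ih hnd2.2 v0 h
      unfold pvDot at hih
      rw [hih]
      ring

-- one Python `d[k] = d.get(k, 0) + δ` shifts the dot product by δ · value(k)
lemma dot_insert (m : List (String × Int)) (d : PySem.Dict String Int)
    (hnd : d.keys.Nodup) (k : String) (δ : Int) :
    pvDot m ((d.insert k (d.getD k 0 + δ)).items) = pvDot m d.items + δ * pvValS m k := by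
  by_cases hc : d.contains k = true
  · have hs : (d.get? k).isSome := by rw [← PySem.Dict.contains_eq_isSome_get?]; exact hc
    rcases Option.isSome_iff_exists.mp hs with ⟨v0, hv0⟩
    have hgetD : d.getD k 0 = v0 := PySem.Dict.getD_of_get?_eq_some d 0 hv0
    have hmem : (k, v0) ∈ d.items := PySem.Dict.mem_items_of_get?_eq_some d hv0
    rw [PySem.Dict.items_insert_of_contains _ _ hc,
      dot_map_replace m k (d.getD k 0 + δ) d.items hnd v0 hmem, hgetD]
    ring
  · have hc' : d.contains k = false := by simpa using hc
    rw [PySem.Dict.items_insert_of_not_contains _ _ hc',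
      PySem.Dict.getD_of_not_contains d 0 hc']
    simp [pvDot]

-- invariant of the inner `for ch in reversed(word)` loop, for any char sequence l
lemma coeff_loop (m : List (String × Int)) (sgn : Int) :
    ∀ (l : List Char) (d : PySem.Dict String Int) (p : Int),
      d.keys.Nodup → (∀ q ∈ d.items, q.1 ∈ m.map Prod.fst) →
      (∀ c ∈ l, String.singleton c ∈ m.map Prod.fst) →
      ((l.foldl (fun dp c =>
          (dp.1.insert (String.singleton c) (dp.1.getD (String.singleton c) 0 + sgn * dp.2),
           dp.2 * 10)) (d, p)).1.keys.Nodup ∧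
       (∀ q ∈ (l.foldl (fun dp c =>
          (dp.1.insert (String.singleton c) (dp.1.getD (String.singleton c) 0 + sgn * dp.2),
           dp.2 * 10)) (d, p)).1.items, q.1 ∈ m.map Prod.fst) ∧
       pvDot m (l.foldl (fun dp c =>
          (dp.1.insert (String.singleton c) (dp.1.getD (String.singleton c) 0 + sgn * dp.2),
           dp.2 * 10)) (d, p)).1.items = pvDot m d.items + sgn * p * pvRval m l) := by
  intro l
  induction l with
  | nil => intro d p hnd hm _; exact ⟨hnd, hm, by simp [pvRval]⟩
  | cons c cs ih =>
    intro d p hnd hm hl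
    simp only [List.foldl_cons]
    set d' := d.insert (String.singleton c) (d.getD (String.singleton c) 0 + sgn * p) with hd'
    have hnd' : d'.keys.Nodup := PySem.Dict.nodup_keys_insert _ _ _ hnd
    have hm' : ∀ q ∈ d'.items, q.1 ∈ m.map Prod.fst := by
      intro q hq
      rcases (PySem.Dict.mem_items_insert _ _ _ _).mp hq with h | h
      · rw [h]; exact hl c (List.mem_cons_self ..)
      · exact hm q h.1
    obtain ⟨h1, h2, h3⟩ := ih d' (p * 10) hnd' hm'
      (fun x hx => hl x (List.mem_cons_of_mem _ hx))
    refine ⟨h1, h2, ?_⟩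
    rw [h3, hd', dot_insert m d hnd (String.singleton c) (sgn * p)]
    show _ = pvDot m d.items + sgn * p * pvRval m (c :: cs)
    simp only [pvRval, pvValD]
    ring

-- invariant of the outer loop over the prefix words
lemma words_loop (m : List (String × Int)) :
    ∀ (ws : List String) (d : PySem.Dict String Int),
      d.keys.Nodup → (∀ q ∈ d.items, q.1 ∈ m.map Prod.fst) →
      (∀ w ∈ ws, ∀ c ∈ w.toList, String.singleton c ∈ m.map Prod.fst) →
      ((ws.foldl (fun d w => (coeff_word 1 w (d, 1)).1) d).keys.Nodup ∧
       (∀ q ∈ (ws.foldl (fun d w => (coeff_word 1 w (d, 1)).1) d).items, q.1 ∈ m.map Prod.fst) ∧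
       pvDot m (ws.foldl (fun d w => (coeff_word 1 w (d, 1)).1) d).items
         = pvDot m d.items + (ws.map (pvHval m)).sum) := by
  intro ws
  induction ws with
  | nil => intro d hnd hm _; exact ⟨hnd, hm, by simp⟩
  | cons w rest ih =>
    intro d hnd hm hws
    simp only [List.foldl_cons]
    obtain ⟨h1, h2, h3⟩ := coeff_loop m 1 w.toList.reverse d 1 hnd hm
      (fun c hc => hws w (List.mem_cons_self ..) c (List.mem_reverse.mp hc))
    obtain ⟨g1, g2, g3⟩ := ih (coeff_word 1 w (d, 1)).1 h1 h2
      (fun x hx => hws x (List.mem_cons_of_mem _ hx))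
    refine ⟨g1, g2, ?_⟩
    rw [g3]
    have : pvDot m (coeff_word 1 w (d, 1)).1.items = pvDot m d.items + pvHval m w := by
      unfold coeff_word
      rw [h3, rval_reverse]
      unfold pvHval
      ring
    rw [this, List.map_cons, List.sum_cons]
    ring

-- ===== VERDICT =====
theorem is_valid_operation_spec : Claim_equal_is_valid_operation := by
  intro m words _ hpre
  obtain ⟨hne, hkeysB⟩ := hpre
  have hkeys : ∀ w ∈ words, ∀ c ∈ w.toList, String.singleton c ∈ m.map Prod.fst := by
    intro w hw c hc
    simp only [List.all_eq_true] at hkeysB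
    simpa using hkeysB w hw c hc
  unfold Spec_is_valid_operation is_valid_operation is_valid_operation_alt
  have hlast : PySem.List.pyGet? words (-1) = some (words.getLast hne) := by
    rw [PySem.List.pyGet?_neg_one, List.getLast?_eq_some_getLast]
  set L := words.getLast hne with hL
  have hLmem : L ∈ words := List.getLast_mem hne
  have hA : replace_letters m L = some (pvHval m L) :=
    replace_letters_eq m L (hkeys L hLmem)
  have hdrop : PySem.List.slice words none (some (-1)) = words.dropLast :=
    PySem.List.slice_to_neg_one words
  -- A's prefix sum
  have hsumA : (words.dropLast).foldl
      (fun acc w => acc.bind (fun s => (replace_letters m w).map (fun v => s + v))) (some 0)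
      = some (((words.dropLast).map (pvHval m)).sum) := by
    rw [opt_foldl (fun s w => (replace_letters m w).map (fun v => s + v))
      (fun s w => s + pvHval m w) words.dropLast 0
      (fun a w hw => by
        simp [replace_letters_eq m w (hkeys w (List.dropLast_subset _ hw))])]
    rw [foldl_add_sum (pvHval m) words.dropLast 0]
    simp
  -- B's coefficient dictionary
  obtain ⟨h1, h2, h3⟩ := words_loop m words.dropLast PySem.Dict.empty
    (by simp [PySem.Dict.keys, PySem.Dict.empty]) (by intro q hq; simp [PySem.Dict.empty] at hq)
    (fun w hw => hkeys w (List.dropLast_subset _ hw))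
  set C1 := (words.dropLast).foldl (fun d w => (coeff_word 1 w (d, 1)).1) PySem.Dict.empty with hC1
  obtain ⟨g1, g2, g3⟩ := coeff_loop m (-1) L.toList.reverse C1 1 h1 h2
    (fun c hc => hkeys L hLmem c (List.mem_reverse.mp hc))
  have hCdot : pvDot m (coeff_word (-1) L (C1, 1)).1.items
      = ((words.dropLast).map (pvHval m)).sum - pvHval m L := by
    unfold coeff_word
    rw [g3, h3, rval_reverse]
    unfold pvHval
    simp [pvDot, PySem.Dict.empty]
    ring
  -- B's final dot-product loop
  have hsumB : (coeff_word (-1) L (C1, 1)).1.items.foldl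
      (fun acc q => acc.bind (fun t => (pvLookup m q.1).map (fun v => t + q.2 * v))) (some 0)
      = some (((words.dropLast).map (pvHval m)).sum - pvHval m L) := by
    rw [opt_foldl (fun (t : Int) (q : String × Int) => (pvLookup m q.1).map (fun v => t + q.2 * v))
      (fun (t : Int) (q : String × Int) => t + q.2 * pvValS m q.1)
      ((coeff_word (-1) L (C1, 1)).1.items) 0
      (fun a q hq => by simp [pvLookup_of_mem (g2 q hq)])]
    rw [foldl_add_sum (fun (q : String × Int) => q.2 * pvValS m q.1) _ 0]
    rw [← hCdot]
    simp [pvDot]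
  rw [hlast]
  simp only [hA, hdrop, hsumA]
  rw [← hC1, hsumB]
  set S := ((words.dropLast).map (pvHval m)).sum
  by_cases h : S = pvHval m L
  · simp [h]
  · simp [sub_eq_zero, h]
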